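-- pv_equiv track=rewrite | github.com/frank217/Summer-Coding-2018 | Regular  practice/ World CodeSprint 13/Watson's Love for Arrays.py | howManyGoodSubarrays
-- ===== SOURCE A (Python) =====
-- def howManyGoodSubarrays(A, m, k):
--     count = 0
--     # Return the number of good subarrays of A.
--     for i in range(len(A)):
--         for j in range(i,len(A)):
--             result = 1
--             for a in A[i:j+1]:
--                 result *= a
--             if result % m ==k:
--                 count +=1
--     return count
-- ===== SOURCE B (Python) =====
-- def howManyGoodSubarrays(A, m, k):
--     # Maintain the running product mod m while extending the right endpoint:
--     # O(n^2) instead of A's O(n^3) re-multiplication of each subarray.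
--     n = len(A)
--     count = 0
--     for i in range(n):
--         p = 1
--         for j in range(i, n):
--             p = (p * A[j]) % m
--             if p == k:
--                 count += 1
--     return count
-- ===== Notes on version B (the rewrite author's own statement) =====
-- stated objective: faster
-- what changed: B keeps a running product reduced mod m while extending the right endpoint, instead of A's re-multiplying every subarray from scratch (and B never builds slices).
import Mathlib
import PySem

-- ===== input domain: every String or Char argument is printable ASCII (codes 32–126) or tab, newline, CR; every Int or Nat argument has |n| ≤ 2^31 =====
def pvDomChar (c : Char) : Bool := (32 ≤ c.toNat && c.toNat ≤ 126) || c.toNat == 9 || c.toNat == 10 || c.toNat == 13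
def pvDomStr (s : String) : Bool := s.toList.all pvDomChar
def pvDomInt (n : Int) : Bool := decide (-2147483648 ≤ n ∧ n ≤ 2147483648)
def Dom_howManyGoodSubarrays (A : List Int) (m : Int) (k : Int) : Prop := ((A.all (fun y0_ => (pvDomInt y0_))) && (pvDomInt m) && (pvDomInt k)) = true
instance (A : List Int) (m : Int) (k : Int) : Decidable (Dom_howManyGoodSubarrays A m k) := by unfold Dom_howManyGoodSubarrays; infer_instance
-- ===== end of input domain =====

-- B replaces A's per-subarray re-multiplication by a running product kept reduced mod m while the
-- right endpoint extends (objective: faster).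

-- ===== PORT A =====
def howManyGoodSubarrays (A : List Int) (m : Int) (k : Int) : Int :=
  (PySem.List.pyRange 0 (A.length : Int) 1).foldl (fun count i =>
    (PySem.List.pyRange i (A.length : Int) 1).foldl (fun count j =>
      let result := (PySem.List.slice A (some i) (some (j + 1))).foldl (fun r a => r * a) 1
      if PySem.Int.mod result m = k then count + 1 else count) count) 0

-- ===== PORT B =====
def howManyGoodSubarrays_alt (A : List Int) (m : Int) (k : Int) : Int :=
  let n : Int := (A.length : Int)
  (PySem.List.pyRange 0 n 1).foldl (fun count i =>
    ((PySem.List.pyRange i n 1).foldl (fun (st : Int × Int) j =>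
      let p := PySem.Int.mod (st.1 * PySem.List.pyGetD A j 0) m
      (p, if p = k then st.2 + 1 else st.2)) (1, count)).2) 0

-- ===== PRECONDITION & SPEC =====
-- Pre_ excludes only m = 0 with a nonempty A, on which Python A raises ZeroDivisionError.
def Pre_howManyGoodSubarrays (A : List Int) (m : Int) (k : Int) : Prop := A = [] ∨ m ≠ 0
instance (A : List Int) (m : Int) (k : Int) : Decidable (Pre_howManyGoodSubarrays A m k) := by unfold Pre_howManyGoodSubarrays; infer_instance
def pvWitness_howManyGoodSubarrays : List Int × Int × Int := ([2, 3, 4], 3, 2)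
def Spec_howManyGoodSubarrays (A : List Int) (m : Int) (k : Int) (out : Int) : Prop := out = howManyGoodSubarrays_alt A m k
instance (A : List Int) (m : Int) (k : Int) (out : Int) : Decidable (Spec_howManyGoodSubarrays A m k out) := by unfold Spec_howManyGoodSubarrays; infer_instance

-- ===== CLAIM (what is proved, stated in full; the proofs are below) =====
def Claim_equal_howManyGoodSubarrays : Prop := ∀ (A : List Int) (m : Int) (k : Int), Dom_howManyGoodSubarrays A m k → Pre_howManyGoodSubarrays A m k → Spec_howManyGoodSubarrays A m k (howManyGoodSubarrays A m k)

-- ===== LEMMAS AND PROOFS =====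

-- reducing the left factor modulo M first does not change a product's emod
theorem pv_emod_key (M a b : Int) : (a % M * b) % M = a * b % M := by
  conv_lhs => rw [Int.mul_emod]
  conv_rhs => rw [Int.mul_emod]
  rw [Int.emod_emod_of_dvd _ dvd_rfl]

-- the same for Python's floor mod, any nonzero modulus
theorem pv_mod_mul_left (m x b : Int) (hm : m ≠ 0) :
    PySem.Int.mod (PySem.Int.mod x m * b) m = PySem.Int.mod (x * b) m := by
  rcases lt_or_gt_of_ne hm with hneg | hpos
  · have h1 : ∀ y : Int, PySem.Int.mod y m = -PySem.Int.mod (-y) (-m) := by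
      intro y
      have h := PySem.Int.mod_neg_neg (-y) (-m)
      simpa using h.symm
    have hp : (0:Int) < -m := by omega
    rw [h1 x, h1 (x * b), h1 (-PySem.Int.mod (-x) (-m) * b)]
    congr 1
    have e1 : -(-PySem.Int.mod (-x) (-m) * b) = PySem.Int.mod (-x) (-m) * b := by ring
    have e2 : -(x * b) = (-x) * b := by ring
    rw [e1, e2, PySem.Int.mod_eq_emod_of_pos hp, PySem.Int.mod_eq_emod_of_pos hp,
       PySem.Int.mod_eq_emod_of_pos hp, pv_emod_key]
  · rw [PySem.Int.mod_eq_emod_of_pos hpos, PySem.Int.mod_eq_emod_of_pos hpos,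
       PySem.Int.mod_eq_emod_of_pos hpos, pv_emod_key]

theorem pv_mod_mod (m x : Int) (hm : m ≠ 0) :
    PySem.Int.mod (PySem.Int.mod x m) m = PySem.Int.mod x m := by
  have h := pv_mod_mul_left m x 1 hm
  simpa using h

-- core: counting via prefix products of a suffix equals B's running-mod fold
theorem pv_core (m k : Int) (hm : m ≠ 0) :
    ∀ (ys : List Int) (q p c : Int), PySem.Int.mod p m = PySem.Int.mod q m →
    (List.range ys.length).foldl
      (fun c t => if PySem.Int.mod (q * ((ys.take (t + 1)).foldl (fun r a => r * a) 1)) m = k then c + 1 else c) c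
    = ((ys.foldl (fun (st : Int × Int) a =>
        let p := PySem.Int.mod (st.1 * a) m
        (p, if p = k then st.2 + 1 else st.2)) (p, c)).2) := by
  intro ys
  induction ys with
  | nil => intro q p c h; simp
  | cons a ys ih =>
    intro q p c h
    have hqa : PySem.Int.mod (p * a) m = PySem.Int.mod (q * a) m := by
      calc PySem.Int.mod (p * a) m
          = PySem.Int.mod (PySem.Int.mod p m * a) m := (pv_mod_mul_left m p a hm).symm
        _ = PySem.Int.mod (PySem.Int.mod q m * a) m := by rw [h]
        _ = PySem.Int.mod (q * a) m := pv_mod_mul_left m q a hm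
    have hnext : PySem.Int.mod (PySem.Int.mod (p * a) m) m = PySem.Int.mod (q * a) m := by
      rw [pv_mod_mod m _ hm, hqa]
    have ihs := ih (q * a) (PySem.Int.mod (p * a) m)
      (if PySem.Int.mod (p * a) m = k then c + 1 else c) hnext
    simp only [List.length_cons, List.range_succ_eq_map, List.foldl_cons, List.foldl_map,
      List.take_succ_cons, List.foldl_cons, one_mul]
    have hmf : ∀ (l : List Int) (x : Int), l.foldl (fun r a => r * a) x = x * l.foldl (fun r a => r * a) 1 := by
      intro l
      induction l with
      | nil => intro x; simp
      | cons b l ihl => intro x; simp only [List.foldl_cons, one_mul]; rw [ihl (x * b), ihl b, mul_assoc]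
    have hfun : (fun (x : Int) (y : Nat) =>
        if PySem.Int.mod (q * List.foldl (fun r a => r * a) a (List.take (y + 1) ys)) m = k then x + 1 else x)
      = (fun (x : Int) (y : Nat) =>
        if PySem.Int.mod (q * a * List.foldl (fun r a => r * a) 1 (List.take (y + 1) ys)) m = k then x + 1 else x) := by
      funext x y
      rw [hmf, ← mul_assoc]
    simp only [Nat.succ_eq_add_one, List.take_zero, List.foldl_nil]
    rw [hfun]
    simpa [hqa] using ihs

theorem howManyGoodSubarrays_spec_aux (A : List Int) (m k : Int) (hm : m ≠ 0) :
    howManyGoodSubarrays A m k = howManyGoodSubarrays_alt A m k := by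
  unfold howManyGoodSubarrays howManyGoodSubarrays_alt
  apply PySem.List.foldl_congr_mem
  intro c i hi
  have hib := PySem.List.mem_pyRange_one.mp hi
  have hi0 : (0:Int) ≤ i := hib.1
  -- B side: the indexed loop over pyRange i n is the fold over the suffix A.drop i
  rw [PySem.List.foldl_pyRange_pyGetD' A 0 (fun (st : Int × Int) a =>
      let p := PySem.Int.mod (st.1 * a) m
      (p, if p = k then st.2 + 1 else st.2)) (1, c) hi0]
  -- A side: re-index j = i + t and turn each slice into a prefix of the suffix
  rw [PySem.List.pyRange_one i (A.length : Int), List.foldl_map]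
  have hlen : ((A.length : Int) - i).toNat = (A.drop i.toNat).length := by
    simp [List.length_drop]; omega
  have hslice : ∀ t : Nat, PySem.List.slice A (some i) (some (i + (t : Int) + 1))
      = (A.drop i.toNat).take (t + 1) := by
    intro t
    rw [PySem.List.slice_toNat A hi0 (by omega)]
    congr 1
    omega
  have hfun : (fun (c : Int) (t : Nat) =>
      if PySem.Int.mod ((PySem.List.slice A (some i) (some (i + (t:Int) + 1))).foldl (fun r a => r * a) 1) m = k then c + 1 else c)
    = (fun (c : Int) (t : Nat) =>
      if PySem.Int.mod ((1:Int) * (((A.drop i.toNat).take (t + 1)).foldl (fun r a => r * a) 1)) m = k then c + 1 else c) := by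
    funext c t
    rw [hslice t, one_mul]
  rw [show (fun (count : Int) (t : Nat) =>
      let result := (PySem.List.slice A (some i) (some (i + (t:Int) + 1))).foldl (fun r a => r * a) 1
      if PySem.Int.mod result m = k then count + 1 else count) = (fun (c : Int) (t : Nat) =>
      if PySem.Int.mod ((PySem.List.slice A (some i) (some (i + (t:Int) + 1))).foldl (fun r a => r * a) 1) m = k then c + 1 else c) from rfl,
    hfun, hlen]
  exact pv_core m k hm (A.drop i.toNat) 1 1 c rfl

-- ===== VERDICT (by name: the statement is the Claim_ definition above) =====
theorem howManyGoodSubarrays_spec : Claim_equal_howManyGoodSubarrays := by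
  intro A m k _ hpre
  rcases hpre with hA | hm
  · subst hA
    show _ = _
    simp [howManyGoodSubarrays, howManyGoodSubarrays_alt, PySem.List.pyRange_one_eq_nil]
  · exact howManyGoodSubarrays_spec_aux A m k hm
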